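-- pv_equiv track=rewrite | github.com/roxxadiiii/machine-learning | collage-labs/lab-3-candidate-elimination.py | minimal_specializations
-- ===== SOURCE A (Python) =====
-- def is_more_general_or_equal(g, s):
--     for i in range(len(g)):
--         if g[i] == '?':
--             continue
--         if s[i] == '?' and g[i] != '?':
--             return False
--         if g[i] != s[i]:
--             return False
--     return True
--
-- def minimal_specializations(g, d, S, col_domains):
--     specializations = []
--     for i in range(len(d)):
--         if g[i] == '?':
--             for v in col_domains[i]:
--                 if v != d[i]:
--                     h = list(g)
--                     h[i] = v
--                     ht = tuple(h)
--                     if any(is_more_general_or_equal(ht, s) for s in S):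
--                         specializations.append(ht)
--     return specializations
-- ===== SOURCE B (Python) =====
-- def minimal_specializations(g, d, S, col_domains):
--     out = []
--     for i in range(len(d)):
--         if g[i] != '?':
--             continue
--         # one scan of S: does any example match g on its fixed positions,
--         # and which concrete values appear in column i of those examples?
--         matched_any = False
--         allowed = set()
--         for s in S:
--             if all(g[j] == '?' or (s[j] != '?' and g[j] == s[j]) for j in range(len(g))):
--                 matched_any = True
--                 if s[i] != '?':
--                     allowed.add(s[i])
--         for v in col_domains[i]:
--             if v != d[i] and (v in allowed or (v == '?' and matched_any)):
--                 h = list(g)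
--                 h[i] = v
--                 out.append(tuple(h))
--     return out
-- ===== Notes on version B (the rewrite author's own statement) =====
-- stated objective: alternative
-- what changed: Instead of rebuilding each candidate hypothesis and rescanning all of S for every domain value, B scans S once per '?'-column to build the set of allowed concrete values (plus a match flag covering a '?' domain value) and then filters the domain values against that index; it trades A's early-exit any() over S for a single full scan per column.
-- outside the precondition, e.g. on minimal_specializations(('?',), ('a',), [('b',), ()], [['b']]): A returns [('b',)], B raises IndexError
import Mathlib
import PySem

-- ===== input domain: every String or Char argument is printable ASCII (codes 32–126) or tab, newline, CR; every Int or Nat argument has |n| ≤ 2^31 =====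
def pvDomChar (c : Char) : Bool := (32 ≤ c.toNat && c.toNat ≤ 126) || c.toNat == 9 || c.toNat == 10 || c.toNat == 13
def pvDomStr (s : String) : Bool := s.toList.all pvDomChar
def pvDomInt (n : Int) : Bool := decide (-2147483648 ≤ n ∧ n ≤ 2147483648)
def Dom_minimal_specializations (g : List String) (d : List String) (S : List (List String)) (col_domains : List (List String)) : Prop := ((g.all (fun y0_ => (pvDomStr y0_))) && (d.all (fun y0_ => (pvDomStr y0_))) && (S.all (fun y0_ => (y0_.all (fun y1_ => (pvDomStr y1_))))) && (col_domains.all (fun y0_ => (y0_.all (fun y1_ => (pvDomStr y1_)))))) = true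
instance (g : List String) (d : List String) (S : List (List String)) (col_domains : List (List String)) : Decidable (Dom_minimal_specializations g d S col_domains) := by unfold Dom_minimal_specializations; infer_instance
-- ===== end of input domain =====

-- ===== PORT A =====
-- B builds a per-column index over S in one scan instead of rescanning S for every candidate (an alternative decomposition, not claimed faster).
-- Equivalence is about the RETURN value; neither version mutates its arguments.
def pv_imge_loop (g s : List String) (i : Nat) : Bool :=
  if h : i < g.length then
    if g.getD i "" = "?" then pv_imge_loop g s (i + 1)
    else if s.getD i "" = "?" ∧ g.getD i "" ≠ "?" then false
    else if g.getD i "" ≠ s.getD i "" then false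
    else pv_imge_loop g s (i + 1)
  else true
termination_by g.length - i

def is_more_general_or_equal (g s : List String) : Bool := pv_imge_loop g s 0

def minimal_specializations (g : List String) (d : List String) (S : List (List String)) (col_domains : List (List String)) : List (List String) :=
  (List.range d.length).foldl (fun acc i =>
    if g.getD i "" = "?" then
      (col_domains.getD i []).foldl (fun acc2 v =>
        if v ≠ d.getD i "" then
          let h := g.set i v
          if S.any (fun s => is_more_general_or_equal h s) then acc2 ++ [h] else acc2
        else acc2) acc
    else acc) []

-- ===== PORT B =====
def pv_match (g s : List String) : Bool :=
  (List.range g.length).all (fun j =>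
    (g.getD j "" == "?") || ((s.getD j "" != "?") && (g.getD j "" == s.getD j "")))

-- one scan of S: (matched_any, allowed values of column i)
def pv_scan (g : List String) (i : Nat) (S : List (List String)) : Bool × PySem.Set String :=
  S.foldl (fun p s =>
    if pv_match g s then
      (true, if s.getD i "" ≠ "?" then PySem.Set.add p.2 (s.getD i "") else p.2)
    else p) (false, PySem.Set.ofList [])

def minimal_specializations_alt (g : List String) (d : List String) (S : List (List String)) (col_domains : List (List String)) : List (List String) :=
  (List.range d.length).foldl (fun acc i =>
    if g.getD i "" ≠ "?" then acc
    else
      let p := pv_scan g i S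
      (col_domains.getD i []).foldl (fun acc2 v =>
        if v ≠ d.getD i "" ∧ (PySem.Set.contains p.2 v || ((v == "?") && p.1)) = true then
          acc2 ++ [g.set i v]
        else acc2) acc) []

-- ===== PRECONDITION & SPEC =====
-- Pre_ excludes shape-mismatched (ragged) inputs -- g shorter than d, a '?' column without a domain list,
-- or an example in S shorter than g while g has a '?' column -- on which A raises IndexError, or returns a
-- value only because any()'s short-circuit happens to skip the short example; B scans all of S there and raises.
def Pre_minimal_specializations (g : List String) (d : List String) (S : List (List String)) (col_domains : List (List String)) : Prop :=
  d.length ≤ g.length ∧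
  (∀ i < d.length, g.getD i "" = "?" → i < col_domains.length) ∧
  ((∃ i < d.length, g.getD i "" = "?") → ∀ s ∈ S, g.length ≤ s.length)
instance (g : List String) (d : List String) (S : List (List String)) (col_domains : List (List String)) : Decidable (Pre_minimal_specializations g d S col_domains) := by unfold Pre_minimal_specializations; infer_instance

def pvWitness_minimal_specializations : List String × List String × List (List String) × List (List String) :=
  (["?", "a"], ["a", "b"], [["b", "b"], ["c", "b"]], [["b", "c"], ["x"]])

def Spec_minimal_specializations (g : List String) (d : List String) (S : List (List String)) (col_domains : List (List String)) (out : List (List String)) : Prop := out = minimal_specializations_alt g d S col_domains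
instance (g : List String) (d : List String) (S : List (List String)) (col_domains : List (List String)) (out : List (List String)) : Decidable (Spec_minimal_specializations g d S col_domains out) := by unfold Spec_minimal_specializations; infer_instance

-- ===== CLAIM (what is proved, stated in full; the proofs are below) =====
def Claim_equal_minimal_specializations : Prop := ∀ (g : List String) (d : List String) (S : List (List String)) (col_domains : List (List String)), Dom_minimal_specializations g d S col_domains → Pre_minimal_specializations g d S col_domains → Spec_minimal_specializations g d S col_domains (minimal_specializations g d S col_domains)

-- ===== LEMMAS AND PROOFS =====
-- position j is acceptable: g is '?' there, or the example carries the same concrete value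
def pvOkAt (g s : List String) (j : Nat) : Prop :=
  g.getD j "" = "?" ∨ (s.getD j "" ≠ "?" ∧ g.getD j "" = s.getD j "")

lemma pv_imge_loop_iff (g s : List String) (k : Nat) :
    pv_imge_loop g s k = true ↔ ∀ j, k ≤ j → j < g.length → pvOkAt g s j := by
  generalize hm : g.length - k = m
  induction m generalizing k with
  | zero =>
    unfold pv_imge_loop
    have hk : ¬ k < g.length := by omega
    simp [hk]
    intro j h1 h2; omega
  | succ n ih =>
    unfold pv_imge_loop
    have hk : k < g.length := by omega
    rw [dif_pos hk]
    have hrec := ih (k + 1) (by omega)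
    constructor
    · intro h j hkj hj
      by_cases hjk : j = k
      · subst hjk
        unfold pvOkAt
        by_cases h1 : g.getD j "" = "?"
        · exact Or.inl h1
        · right
          rw [if_neg h1] at h
          by_cases h2 : s.getD j "" = "?" ∧ g.getD j "" ≠ "?"
          · rw [if_pos h2] at h; exact absurd h (by simp)
          · rw [if_neg h2] at h
            by_cases h3 : g.getD j "" ≠ s.getD j ""
            · rw [if_pos h3] at h; exact absurd h (by simp)
            · push_neg at h3
              refine ⟨fun hs => h2 ⟨hs, h1⟩, h3⟩
      · have hj' : k + 1 ≤ j := by omega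
        by_cases h1 : g.getD k "" = "?"
        · rw [if_pos h1] at h
          exact (hrec.mp h) j hj' hj
        · rw [if_neg h1] at h
          by_cases h2 : s.getD k "" = "?" ∧ g.getD k "" ≠ "?"
          · rw [if_pos h2] at h; exact absurd h (by simp)
          · rw [if_neg h2] at h
            by_cases h3 : g.getD k "" ≠ s.getD k ""
            · rw [if_pos h3] at h; exact absurd h (by simp)
            · rw [if_neg h3] at h
              exact (hrec.mp h) j hj' hj
    · intro h
      have hk' := h k (le_refl k) hk
      have htail : pv_imge_loop g s (k + 1) = true :=
        hrec.mpr (fun j h1 h2 => h j (by omega) h2)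
      unfold pvOkAt at hk'
      by_cases h1 : g.getD k "" = "?"
      · rw [if_pos h1]; exact htail
      · rw [if_neg h1]
        rcases hk' with h1' | ⟨hs, heq⟩
        · exact absurd h1' h1
        · rw [if_neg (by intro ⟨a, _⟩; exact hs a), if_neg (by simpa using heq)]
          exact htail

lemma pv_match_iff (g s : List String) :
    pv_match g s = true ↔ ∀ j, j < g.length → pvOkAt g s j := by
  unfold pv_match pvOkAt
  simp [List.all_eq_true, List.mem_range]

lemma pv_getD_default {α : Type} [Inhabited α] (l : List α) (i : Nat) (d : α) (h : ¬ i < l.length) :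
    l.getD i d = d := by
  apply List.getD_eq_default
  omega

lemma pv_imge_set_iff (g s : List String) (i : Nat) (v : String)
    (hg : g.getD i "" = "?") :
    is_more_general_or_equal (g.set i v) s = true ↔
      pv_match g s = true ∧ (v = "?" ∨ (s.getD i "" ≠ "?" ∧ s.getD i "" = v)) := by
  have hi : i < g.length := by
    by_contra h
    rw [pv_getD_default g i "" h] at hg
    exact absurd hg (by decide)
  rw [is_more_general_or_equal, pv_imge_loop_iff, pv_match_iff]
  have hset : ∀ j, (g.set i v).getD j "" = if j = i then v else g.getD j "" := by
    intro j
    by_cases hj : j = i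
    · subst hj; simp [List.getD, List.getElem?_set, hi]
    · simp only [List.getD, List.getElem?_set]
      rw [if_neg (fun h => hj h.symm), if_neg hj]
  constructor
  · intro h
    refine ⟨fun j hj => ?_, ?_⟩
    · have := h j (by omega) (by simpa using hj)
      unfold pvOkAt at this ⊢
      by_cases hji : j = i
      · subst hji; exact Or.inl hg
      · rwa [hset j, if_neg hji] at this
    · have := h i (by omega) (by simpa using hi)
      unfold pvOkAt at this
      rw [hset i, if_pos rfl] at this
      rcases this with h1 | ⟨h1, h2⟩
      · exact Or.inl h1
      · exact Or.inr ⟨h1, h2.symm⟩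
  · rintro ⟨hm, hv⟩ j _ hj
    rw [List.length_set] at hj
    unfold pvOkAt
    rw [hset j]
    by_cases hji : j = i
    · rw [if_pos hji]
      rcases hv with h1 | ⟨h1, h2⟩
      · exact Or.inl h1
      · exact Or.inr ⟨by rw [hji]; exact h1, by rw [hji]; exact h2.symm⟩
    · rw [if_neg hji]
      exact hm j hj

lemma pv_scan_fst_aux (g : List String) (i : Nat) (S : List (List String)) (p : Bool × PySem.Set String) :
    (S.foldl (fun p s =>
      if pv_match g s then
        (true, if s.getD i "" ≠ "?" then PySem.Set.add p.2 (s.getD i "") else p.2)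
      else p) p).1 = (p.1 || S.any (pv_match g)) := by
  induction S generalizing p with
  | nil => simp
  | cons s S ih =>
    simp only [List.foldl_cons, List.any_cons]
    by_cases h : pv_match g s = true
    · rw [if_pos h, ih]; simp [h]
    · rw [if_neg h, ih]; simp [h]

lemma pv_scan_fst (g : List String) (i : Nat) (S : List (List String)) :
    (pv_scan g i S).1 = S.any (pv_match g) := by
  unfold pv_scan
  rw [pv_scan_fst_aux]
  simp

lemma pv_scan_mem_aux (g : List String) (i : Nat) (S : List (List String)) (v : String)
    (p : Bool × PySem.Set String) :
    v ∈ (S.foldl (fun p s =>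
      if pv_match g s then
        (true, if s.getD i "" ≠ "?" then PySem.Set.add p.2 (s.getD i "") else p.2)
      else p) p).2 ↔ v ∈ p.2 ∨ ∃ s ∈ S, pv_match g s = true ∧ s.getD i "" ≠ "?" ∧ s.getD i "" = v := by
  induction S generalizing p with
  | nil => simp
  | cons s S ih =>
    simp only [List.foldl_cons]
    by_cases h : pv_match g s = true
    · rw [if_pos h]
      by_cases h2 : s.getD i "" ≠ "?"
      · rw [ih]
        simp only [if_pos h2, PySem.Set.mem_add, List.mem_cons]
        constructor
        · rintro (⟨hp | hv⟩ | ⟨t, ht, hmt, h2t, hvt⟩)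
          · exact Or.inl hp
          · exact Or.inr ⟨s, Or.inl rfl, h, h2, hv.symm⟩
          · exact Or.inr ⟨t, Or.inr ht, hmt, h2t, hvt⟩
        · rintro (hp | ⟨t, (rfl | ht), hmt, h2t, hvt⟩)
          · exact Or.inl (Or.inl hp)
          · exact Or.inl (Or.inr hvt.symm)
          · exact Or.inr ⟨t, ht, hmt, h2t, hvt⟩
      · rw [ih]
        simp only [if_neg h2, List.mem_cons]
        push_neg at h2
        constructor
        · rintro (hp | ⟨t, ht, hmt, h2t, hvt⟩)
          · exact Or.inl hp
          · exact Or.inr ⟨t, Or.inr ht, hmt, h2t, hvt⟩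
        · rintro (hp | ⟨t, (rfl | ht), hmt, h2t, hvt⟩)
          · exact Or.inl hp
          · exact absurd h2 h2t
          · exact Or.inr ⟨t, ht, hmt, h2t, hvt⟩
    · rw [if_neg h, ih]
      simp only [List.mem_cons]
      constructor
      · rintro (hp | ⟨t, ht, hmt, h2t, hvt⟩)
        · exact Or.inl hp
        · exact Or.inr ⟨t, Or.inr ht, hmt, h2t, hvt⟩
      · rintro (hp | ⟨t, (rfl | ht), hmt, h2t, hvt⟩)
        · exact Or.inl hp
        · exact absurd hmt h
        · exact Or.inr ⟨t, ht, hmt, h2t, hvt⟩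

lemma pv_scan_mem (g : List String) (i : Nat) (S : List (List String)) (v : String) :
    v ∈ (pv_scan g i S).2 ↔ ∃ s ∈ S, pv_match g s = true ∧ s.getD i "" ≠ "?" ∧ s.getD i "" = v := by
  unfold pv_scan
  rw [pv_scan_mem_aux]
  simp [PySem.Set.ofList]

lemma pv_key (g : List String) (S : List (List String)) (i : Nat) (v : String)
    (hg : g.getD i "" = "?") :
    S.any (fun s => is_more_general_or_equal (g.set i v) s) =
      (PySem.Set.contains (pv_scan g i S).2 v || ((v == "?") && (pv_scan g i S).1)) := by
  rw [Bool.eq_iff_iff]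
  rw [List.any_eq_true]
  rw [Bool.or_eq_true, Bool.and_eq_true, PySem.Set.contains_iff, pv_scan_fst,
      pv_scan_mem, beq_iff_eq, List.any_eq_true]
  constructor
  · rintro ⟨s, hs, h⟩
    rw [pv_imge_set_iff g s i v hg] at h
    rcases h with ⟨hm, h1 | ⟨h1, h2⟩⟩
    · exact Or.inr ⟨h1, s, hs, hm⟩
    · exact Or.inl ⟨s, hs, hm, h1, h2⟩
  · rintro (⟨s, hs, hm, h1, h2⟩ | ⟨hv, s, hs, hm⟩)
    · exact ⟨s, hs, (pv_imge_set_iff g s i v hg).mpr ⟨hm, Or.inr ⟨h1, h2⟩⟩⟩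
    · exact ⟨s, hs, (pv_imge_set_iff g s i v hg).mpr ⟨hm, Or.inl hv⟩⟩

-- ===== VERDICT (by name: the statement is the Claim_ definition above) =====
theorem minimal_specializations_spec : Claim_equal_minimal_specializations := by
  intro g d S col_domains _ _
  unfold Spec_minimal_specializations minimal_specializations minimal_specializations_alt
  apply List.foldl_ext
  intro acc i _
  by_cases hg : g.getD i "" = "?"
  · rw [if_pos hg, if_neg (by simpa using hg)]
    apply List.foldl_ext
    intro acc2 v _
    by_cases hv : v ≠ d.getD i ""
    · rw [if_pos hv]
      show (if (S.any fun s => is_more_general_or_equal (g.set i v) s) = true then acc2 ++ [g.set i v] else acc2) = _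
      rw [pv_key g S i v hg]
      by_cases hc : (PySem.Set.contains (pv_scan g i S).2 v || ((v == "?") && (pv_scan g i S).1)) = true
      · rw [if_pos hc, if_pos ⟨hv, hc⟩]
      · rw [if_neg hc, if_neg (fun h => hc h.2)]
    · rw [if_neg hv, if_neg (fun h => hv h.1)]
  · rw [if_neg hg, if_pos (by simpa using hg)]
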